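-- pv_equiv track=rewrite | github.com/shihwesley/rlm-sandbox | mcp_server/apple_docs.py | _truncate_preserving_code
-- ===== SOURCE A (Python) =====
-- def _truncate_preserving_code(text: str, max_chars: int = 8000) -> str:
--     """Truncate text but never cut inside a code block.
--
--     If the text is under max_chars, return as-is. Otherwise, find a safe
--     truncation point that doesn't split a ``` block.
--     """
--     if len(text) <= max_chars:
--         return text
--
--     # Find all code block boundaries
--     in_code = False
--     last_safe_point = 0
--     for i, char in enumerate(text):
--         if text[i:i + 3] == "```":
--             in_code = not in_code
--         if not in_code and i <= max_chars:
--             # Track last point outside a code block near a newline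
--             if char == "\n":
--                 last_safe_point = i
--
--     if last_safe_point > max_chars * 0.5:
--         return text[:last_safe_point] + "\n...(truncated, code blocks preserved)"
--     # Fallback: hard cut if no safe point found
--     return text[:max_chars] + "\n...(truncated)"
-- ===== SOURCE B (Python) =====
-- def _last_safe_merge(fences, newlines):
--     """Merge two sorted position lists: last newline preceded by an even
--     number of fence-toggle positions."""
--     parity = False
--     fi = 0
--     last = 0
--     for j in newlines:
--         while fi < len(fences) and fences[fi] <= j:
--             parity = not parity
--             fi += 1
--         if not parity:
--             last = j
--     return last
--
--
-- def _truncate_preserving_code(text: str, max_chars: int = 8000) -> str: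
--     """Truncate text but never cut inside a code block.
--
--     Staged rewrite: extract the positions of fence toggles ("```") and of
--     newlines in the first max_chars+1 characters, then merge the two sorted
--     lists to find the last newline outside a code block. Only the prefix is
--     ever scanned.
--     """
--     if len(text) <= max_chars:
--         return text
--     idxs = range(max_chars + 1)
--     fences = [i for i in idxs if text[i:i + 3] == "```"]
--     newlines = [i for i in idxs if text[i:i + 1] == "\n"]
--     last_safe = _last_safe_merge(fences, newlines)
--     if 2 * last_safe > max_chars:
--         return text[:last_safe] + "\n...(truncated, code blocks preserved)"
--     return text[:max_chars] + "\n...(truncated)"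
-- ===== Notes on version B (the rewrite author's own statement) =====
-- stated objective: alternative
-- what changed: B replaces A's whole-text per-character in_code state machine by staged passes: it extracts the sorted position lists of fence toggles and of newlines in text[:max_chars+1] and merges the two lists with a pointer to find the last newline preceded by an even number of fence toggles; the tail past max_chars is never scanned.
import Mathlib
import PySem

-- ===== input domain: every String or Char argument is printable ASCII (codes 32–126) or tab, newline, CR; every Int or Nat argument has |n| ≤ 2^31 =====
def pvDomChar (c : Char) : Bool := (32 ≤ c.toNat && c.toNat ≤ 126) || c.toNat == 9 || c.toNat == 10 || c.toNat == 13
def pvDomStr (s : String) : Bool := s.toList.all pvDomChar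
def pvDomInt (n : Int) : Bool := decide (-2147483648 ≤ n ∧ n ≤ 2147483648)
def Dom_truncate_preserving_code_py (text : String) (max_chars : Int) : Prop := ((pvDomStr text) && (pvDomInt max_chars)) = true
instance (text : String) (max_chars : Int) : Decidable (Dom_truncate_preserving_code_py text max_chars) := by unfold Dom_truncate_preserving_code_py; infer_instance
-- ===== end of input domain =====

-- B replaces A's whole-text per-character state machine by staged passes over the prefix
-- text[:max_chars+1]: extract fence-toggle and newline position lists, then merge the two
-- sorted lists to find the last newline with an even number of preceding fence toggles.

-- ===== PORT A =====
-- loop body of A: toggle in_code on an (overlapping) "```" match at i, then record a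
-- newline at i when outside code and i <= max_chars
def pvStepA (cs : List Char) (max_chars : Int) (st : Bool × Int) (i : Int) : Bool × Int :=
  let in_code := if PySem.List.slice cs (some i) (some (i + 3)) = ['`', '`', '`'] then !st.1 else st.1
  let last := if !in_code && decide (i ≤ max_chars) && (PySem.List.pyGetD cs i ' ' == '\n') then i else st.2
  (in_code, last)

def truncate_preserving_code_py (text : String) (max_chars : Int) : String :=
  if (text.toList.length : Int) ≤ max_chars then text
  else
    -- Python compares 'last_safe_point > max_chars * 0.5' in floats; for |max_chars| ≤ 2^31
    -- the product by 0.5 and the comparison are exact, so the test equals 2*last > max_chars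
    if 2 * ((PySem.List.pyRange 0 (text.toList.length : Int) 1).foldl
              (pvStepA text.toList max_chars) (false, 0)).2 > max_chars then
      String.ofList (PySem.List.slice text.toList none
          (some ((PySem.List.pyRange 0 (text.toList.length : Int) 1).foldl
              (pvStepA text.toList max_chars) (false, 0)).2)
        ++ "\n...(truncated, code blocks preserved)".toList)
    else
      String.ofList (PySem.List.slice text.toList none (some max_chars)
        ++ "\n...(truncated)".toList)

-- ===== PORT B =====
-- the two comprehensions: fence-toggle positions and newline positions among idxs
def pvFences (cs : List Char) (idxs : List Int) : List Int :=
  idxs.filter (fun i => PySem.List.slice cs (some i) (some (i + 3)) == ['`', '`', '`'])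

def pvNewlines (cs : List Char) (idxs : List Int) : List Int :=
  idxs.filter (fun i => PySem.List.slice cs (some i) (some (i + 1)) == ['\n'])

-- the inner 'while fi < len(fences) and fences[fi] <= j' loop of _last_safe_merge
def pvAdvance (fences : List Int) (j : Int) (parity : Bool) (fi : Nat) : Bool × Nat :=
  if h : fi < fences.length ∧ fences.getD fi 0 ≤ j then pvAdvance fences j (!parity) (fi + 1)
  else (parity, fi)
termination_by fences.length - fi
decreasing_by omega

-- body of _last_safe_merge's 'for j in newlines' loop, state (parity, fi, last)
def pvMergeStep (fences : List Int) (st : Bool × Nat × Int) (j : Int) : Bool × Nat × Int :=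
  let pk := pvAdvance fences j st.1 st.2.1
  (pk.1, pk.2, if !pk.1 then j else st.2.2)

def pvLastSafeMerge (fences newlines : List Int) : Int :=
  (newlines.foldl (pvMergeStep fences) (false, 0, 0)).2.2

def truncate_preserving_code_py_alt (text : String) (max_chars : Int) : String :=
  if (text.toList.length : Int) ≤ max_chars then text
  else
    let idxs := PySem.List.pyRange 0 (max_chars + 1) 1
    let last_safe := pvLastSafeMerge (pvFences text.toList idxs) (pvNewlines text.toList idxs)
    if 2 * last_safe > max_chars then
      String.ofList (PySem.List.slice text.toList none (some last_safe)
        ++ "\n...(truncated, code blocks preserved)".toList)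
    else
      String.ofList (PySem.List.slice text.toList none (some max_chars)
        ++ "\n...(truncated)".toList)

-- ===== PRECONDITION & SPEC =====
def Spec_truncate_preserving_code_py (text : String) (max_chars : Int) (out : String) : Prop := out = truncate_preserving_code_py_alt text max_chars
instance (text : String) (max_chars : Int) (out : String) : Decidable (Spec_truncate_preserving_code_py text max_chars out) := by unfold Spec_truncate_preserving_code_py; infer_instance

-- ===== CLAIM (what is proved, stated in full; the proofs are below) =====
def Claim_equal_truncate_preserving_code_py : Prop := ∀ (text : String) (max_chars : Int), Dom_truncate_preserving_code_py text max_chars → Spec_truncate_preserving_code_py text max_chars (truncate_preserving_code_py text max_chars)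

-- ===== LEMMAS AND PROOFS =====

-- proof-side intermediate: A's loop body restricted to the prefix (no 'i <= max_chars' test)
def pvStepB (cs : List Char) (st : Bool × Int) (i : Int) : Bool × Int :=
  if PySem.List.slice cs (some i) (some (i + 3)) = ['`', '`', '`'] then (!st.1, st.2)
  else if PySem.List.pyGetD cs i ' ' == '\n' && !st.1 then (st.1, i)
  else st

-- past max_chars, A's step never moves the recorded safe point
lemma pvStepA_tail_snd (cs : List Char) (max_chars : Int) (l : List Int)
    (h : ∀ i ∈ l, max_chars < i) (st : Bool × Int) :
    (l.foldl (pvStepA cs max_chars) st).2 = st.2 := by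
  induction l generalizing st with
  | nil => rfl
  | cons a t ih =>
    have ha := h a (by simp)
    simp only [List.foldl_cons]
    rw [ih (fun i hi => h i (by simp [hi]))]
    simp [pvStepA, not_le.mpr ha]

-- if "```" matches at i then the character at i is a backtick
lemma pvBacktick_of_slice (cs : List Char) (i : Int) (h0 : 0 ≤ i)
    (h : PySem.List.slice cs (some i) (some (i + 3)) = ['`', '`', '`']) :
    PySem.List.pyGetD cs i ' ' = '`' := by
  rw [PySem.List.slice_toNat cs h0 (by omega), show (i + 3).toNat - i.toNat = 3 by omega] at h
  have h0q : (List.drop i.toNat cs)[0]? = some '`' := by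
    have := congrArg (fun l => l[0]?) h
    simpa [List.getElem?_take] using this
  rw [List.getElem?_drop] at h0q
  rw [show i = ((i.toNat : Nat) : Int) by omega, PySem.List.pyGetD_natCast,
    List.getD_eq_getElem?_getD]
  simpa using congrArg (fun o => o.getD ' ') h0q

-- within the scanned prefix A's step agrees with the prefix-restricted step
lemma pvStep_agree (cs : List Char) (max_chars i : Int) (h0 : 0 ≤ i) (hle : i ≤ max_chars)
    (st : Bool × Int) : pvStepA cs max_chars st i = pvStepB cs st i := by
  obtain ⟨b, ls⟩ := st
  unfold pvStepA pvStepB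
  by_cases hsl : PySem.List.slice cs (some i) (some (i + 3)) = ['`', '`', '`']
  · have hch := pvBacktick_of_slice cs i h0 hsl
    simp [hsl, hch]
  · simp only [if_neg hsl]
    rcases b with _ | _
    · by_cases hn : PySem.List.pyGetD cs i ' ' = '\n' <;> simp [hn, hle]
    · simp

-- the single-character slice test equals the indexing test (for 0 ≤ i)
lemma pvNl_iff (cs : List Char) (i : Int) (h0 : 0 ≤ i) :
    (PySem.List.slice cs (some i) (some (i + 1)) = ['\n'])
      ↔ (PySem.List.pyGetD cs i ' ' = '\n') := by
  rw [PySem.List.slice_toNat cs h0 (by omega), show (i + 1).toNat - i.toNat = 1 by omega,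
    show i = ((i.toNat : Nat) : Int) by omega, PySem.List.pyGetD_natCast,
    List.getD_eq_getElem?_getD, Int.toNat_natCast,
    show cs[i.toNat]? = (cs.drop i.toNat)[0]? by rw [List.getElem?_drop]; simp]
  cases h : cs.drop i.toNat with
  | nil => simp
  | cons a t => simp

-- the while loop computes (parity xor odd (c-k), c) for the cut point c of (· ≤ j)
lemma pvAdvance_eq (F : List Int) (j : Int) (c : Nat)
    (hcl : c ≤ F.length)
    (hcut : ∀ i, i < F.length → (F.getD i 0 ≤ j ↔ i < c)) :
    ∀ n k p, c - k = n → k ≤ c → pvAdvance F j p k = (xor p (decide ((c - k) % 2 = 1)), c) := by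
  intro n
  induction n with
  | zero =>
    intro k p hn hkc
    have hk : k = c := by omega
    subst hk
    rw [pvAdvance]
    have hng : ¬ (k < F.length ∧ F.getD k 0 ≤ j) := by
      rintro ⟨h1, h2⟩
      exact absurd ((hcut k h1).1 h2) (by omega)
    rw [dif_neg hng]
    simp
  | succ n ih =>
    intro k p hn hkc
    have hk : k < c := by omega
    rw [pvAdvance, dif_pos ⟨by omega, (hcut k (by omega)).2 hk⟩,
      ih (k + 1) (!p) (by omega) (by omega),
      show c - (k + 1) = n from by omega, show c - k = n + 1 from by omega]
    congr 1
    have hx : ((n + 1) % 2 = 1) ↔ ¬ (n % 2 = 1) := by omega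
    rcases p with _ | _ <;> simp [hx] <;>
      (by_cases h : n % 2 = 0
       · simp [h]
       · simp [show n % 2 = 1 from by omega])

-- in a strictly sorted list, (· ≤ j) holds exactly on the first countP positions
lemma pvSorted_cut (F : List Int) (hs : F.Pairwise (· < ·)) (j : Int) :
    ∀ i, i < F.length → (F.getD i 0 ≤ j ↔ i < F.countP (fun f => decide (f ≤ j))) := by
  induction F with
  | nil => intro i hi; simp at hi
  | cons a t ih =>
    intro i hi
    rcases List.pairwise_cons.1 hs with ⟨ha, ht⟩
    by_cases haj : a ≤ j
    · have hc : (a :: t).countP (fun f => decide (f ≤ j)) = t.countP (fun f => decide (f ≤ j)) + 1 := by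
        rw [List.countP_cons]; simp [haj]
      cases i with
      | zero => simpa [hc] using haj
      | succ n =>
        have hIH := ih ht n (by simpa using hi)
        simp only [List.getD_cons_succ, hc]
        simpa [Nat.succ_lt_succ_iff] using hIH
    · have hc : (a :: t).countP (fun f => decide (f ≤ j)) = 0 := by
        rw [List.countP_eq_zero]
        intro b hb
        simp only [List.mem_cons] at hb
        simp only [decide_eq_true_eq]
        rcases hb with rfl | hb
        · omega
        · have := ha b hb
          omega
      rw [hc]
      cases i with
      | zero => simpa using haj
      | succ n =>
        simp only [List.getD_cons_succ]
        constructor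
        · intro hle
          exfalso
          have hn : n < t.length := by simpa using hi
          have hmem : t.getD n 0 ∈ t := by
            rw [List.getD_eq_getElem?_getD, List.getElem?_eq_getElem hn]
            simpa using List.getElem_mem hn
          have := ha _ hmem
          omega
        · omega

-- parity bookkeeping: consuming c-k fences flips the parity bit to that of c
lemma pvParity (k c : Nat) (h : k ≤ c) :
    xor ((k % 2 == 1)) (decide ((c - k) % 2 = 1)) = ((c % 2 == 1)) := by
  by_cases h1 : k % 2 = 1 <;> by_cases h2 : c % 2 = 1
  · simp [h1, h2, show (c - k) % 2 = 0 from by omega]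
  · simp [h1, h2, show (c - k) % 2 = 1 from by omega]
  · simp [h1, h2, show (c - k) % 2 = 1 from by omega]
  · simp [h1, h2, show (c - k) % 2 = 0 from by omega]

-- toggling parity of a one-longer list
lemma pvFlip (L : Nat) : (!(L % 2 == 1)) = (((L + 1) % 2 == 1)) := by
  by_cases h : L % 2 = 1
  · simp [h, show (L + 1) % 2 = 0 from by omega]
  · simp [h, show (L + 1) % 2 = 1 from by omega]

lemma pvRange_succ (m : Nat) :
    PySem.List.pyRange 0 ((m + 1 : Nat) : Int) 1
      = PySem.List.pyRange 0 (m : Int) 1 ++ [(m : Int)] := by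
  push_cast
  exact PySem.List.pyRange_one_succ_right (show (0:Int) ≤ (m:Int) by omega)

lemma pvFences_prefix (cs : List Char) (m M : Nat) (h : m ≤ M) :
    pvFences cs (PySem.List.pyRange 0 (M : Int) 1)
      = pvFences cs (PySem.List.pyRange 0 (m : Int) 1)
        ++ pvFences cs (PySem.List.pyRange (m : Int) (M : Int) 1) := by
  unfold pvFences
  rw [← List.filter_append, ← PySem.List.pyRange_one_append 0 (m : Int) (M : Int)
    (by omega) (by exact_mod_cast h)]

-- counting the fences at most m in the full fence list, when m itself is no fence,
-- gives exactly the number of fences strictly below m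
lemma pvCountP_le_eq (cs : List Char) (m M : Nat) (h : m < M)
    (hf : ¬ (PySem.List.slice cs (some (m : Int)) (some ((m : Int) + 3)) = ['`', '`', '`'])) :
    (pvFences cs (PySem.List.pyRange 0 (M : Int) 1)).countP (fun f => decide (f ≤ (m : Int)))
      = (pvFences cs (PySem.List.pyRange 0 (m : Int) 1)).length := by
  rw [pvFences_prefix cs m M (le_of_lt h), List.countP_append]
  have h1 : (pvFences cs (PySem.List.pyRange 0 (m : Int) 1)).countP (fun f => decide (f ≤ (m : Int)))
      = (pvFences cs (PySem.List.pyRange 0 (m : Int) 1)).length := by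
    apply List.countP_eq_length.2
    intro f hfm
    have := (PySem.List.mem_pyRange_one).1 (List.mem_of_mem_filter hfm)
    simp only [decide_eq_true_eq]
    omega
  have h2 : (pvFences cs (PySem.List.pyRange (m : Int) (M : Int) 1)).countP
      (fun f => decide (f ≤ (m : Int))) = 0 := by
    apply List.countP_eq_zero.2
    intro f hfm
    have hrange := (PySem.List.mem_pyRange_one).1 (List.mem_of_mem_filter hfm)
    simp only [decide_eq_true_eq, not_le]
    rcases lt_or_eq_of_le hrange.1 with hlt | heq
    · omega
    · exfalso
      apply hf
      have := List.of_mem_filter hfm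
      rw [heq]
      simpa using this
  omega

-- main invariant: the prefix fold and the merge fold agree on the recorded safe point
lemma pvMain (cs : List Char) (M : Nat) (m : Nat) (hm : m ≤ M) :
    (((PySem.List.pyRange 0 (m : Int) 1).foldl (pvStepB cs) (false, 0)).1
        = (((pvFences cs (PySem.List.pyRange 0 (m : Int) 1)).length) % 2 == 1))
    ∧ (((PySem.List.pyRange 0 (m : Int) 1).foldl (pvStepB cs) (false, 0)).2
        = ((pvNewlines cs (PySem.List.pyRange 0 (m : Int) 1)).foldl
            (pvMergeStep (pvFences cs (PySem.List.pyRange 0 (M : Int) 1))) (false, 0, 0)).2.2)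
    ∧ (((pvNewlines cs (PySem.List.pyRange 0 (m : Int) 1)).foldl
            (pvMergeStep (pvFences cs (PySem.List.pyRange 0 (M : Int) 1))) (false, 0, 0)).1
        = (((pvNewlines cs (PySem.List.pyRange 0 (m : Int) 1)).foldl
            (pvMergeStep (pvFences cs (PySem.List.pyRange 0 (M : Int) 1))) (false, 0, 0)).2.1 % 2 == 1))
    ∧ (∃ t : Int, t < (m : Int)
        ∧ ((pvNewlines cs (PySem.List.pyRange 0 (m : Int) 1)).foldl
            (pvMergeStep (pvFences cs (PySem.List.pyRange 0 (M : Int) 1))) (false, 0, 0)).2.1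
          = (pvFences cs (PySem.List.pyRange 0 (M : Int) 1)).countP (fun f => decide (f ≤ t))) := by
  induction m with
  | zero =>
    rw [show ((0 : Nat) : Int) = 0 by norm_num, PySem.List.pyRange_one_eq_nil (le_refl (0 : Int))]
    refine ⟨by simp [pvFences], by simp [pvNewlines], by simp [pvNewlines], -1, by norm_num, ?_⟩
    simp only [pvNewlines, List.filter_nil, List.foldl_nil]
    symm
    apply List.countP_eq_zero.2
    intro f hfm
    have := (PySem.List.mem_pyRange_one).1 (List.mem_of_mem_filter hfm)
    simp only [decide_eq_true_eq]
    omega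
  | succ m ih =>
    have hmM : m < M := by omega
    obtain ⟨ih1, ih2, ih3, t, ht, ih4⟩ := ih (by omega)
    rw [pvRange_succ m]
    by_cases hf : PySem.List.slice cs (some (m : Int)) (some ((m : Int) + 3)) = ['`', '`', '`']
    · -- a fence toggle at m (hence no newline at m)
      have hget : PySem.List.pyGetD cs (m : Int) ' ' = '`' :=
        pvBacktick_of_slice cs (m : Int) (by omega) hf
      have hnl : ¬ (PySem.List.slice cs (some (m : Int)) (some ((m : Int) + 1)) = ['\n']) := by
        rw [pvNl_iff cs (m : Int) (by omega), hget]
        simp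
      have e1 : pvFences cs (PySem.List.pyRange 0 (m : Int) 1 ++ [(m : Int)])
          = pvFences cs (PySem.List.pyRange 0 (m : Int) 1) ++ [(m : Int)] := by
        simp [pvFences, List.filter_append, List.filter_singleton, hf]
      have e2 : pvNewlines cs (PySem.List.pyRange 0 (m : Int) 1 ++ [(m : Int)])
          = pvNewlines cs (PySem.List.pyRange 0 (m : Int) 1) := by
        simp [pvNewlines, List.filter_append, List.filter_singleton, hnl]
      rw [e1, e2]
      simp only [List.foldl_append, List.foldl_cons, List.foldl_nil]
      refine ⟨?_, ?_, ih3, t, by omega, ih4⟩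
      · show (pvStepB cs _ (m : Int)).1 = _
        rw [pvStepB, if_pos hf]
        simp only [List.length_append, List.length_singleton]
        rw [ih1]
        exact pvFlip _
      · show (pvStepB cs _ (m : Int)).2 = _
        rw [pvStepB, if_pos hf]
        exact ih2
    · have e1 : pvFences cs (PySem.List.pyRange 0 (m : Int) 1 ++ [(m : Int)])
          = pvFences cs (PySem.List.pyRange 0 (m : Int) 1) := by
        simp [pvFences, List.filter_append, List.filter_singleton, hf]
      by_cases hnl : PySem.List.slice cs (some (m : Int)) (some ((m : Int) + 1)) = ['\n']
      · -- a newline at m, outside any fence toggle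
        have hget : PySem.List.pyGetD cs (m : Int) ' ' = '\n' :=
          (pvNl_iff cs (m : Int) (by omega)).1 hnl
        have e2 : pvNewlines cs (PySem.List.pyRange 0 (m : Int) 1 ++ [(m : Int)])
            = pvNewlines cs (PySem.List.pyRange 0 (m : Int) 1) ++ [(m : Int)] := by
          simp [pvNewlines, List.filter_append, List.filter_singleton, hnl]
        rw [e1, e2]
        simp only [List.foldl_append, List.foldl_cons, List.foldl_nil]
        -- the advance step: pointer moves to the full count of fences ≤ m
        have hsorted : (pvFences cs (PySem.List.pyRange 0 (M : Int) 1)).Pairwise (· < ·) :=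
          (PySem.List.pairwise_lt_pyRange_one 0 (M : Int)).sublist List.filter_sublist
        have hkc : ((pvNewlines cs (PySem.List.pyRange 0 (m : Int) 1)).foldl
              (pvMergeStep (pvFences cs (PySem.List.pyRange 0 (M : Int) 1))) (false, 0, 0)).2.1
            ≤ (pvFences cs (PySem.List.pyRange 0 (M : Int) 1)).countP
                (fun f => decide (f ≤ (m : Int))) := by
          rw [ih4]
          exact List.countP_mono_left (fun x _ hx => by simp at hx ⊢; omega)
        have hadv := pvAdvance_eq (pvFences cs (PySem.List.pyRange 0 (M : Int) 1)) (m : Int)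
          ((pvFences cs (PySem.List.pyRange 0 (M : Int) 1)).countP (fun f => decide (f ≤ (m : Int))))
          (List.countP_le_length)
          (pvSorted_cut _ hsorted (m : Int)) _
          ((pvNewlines cs (PySem.List.pyRange 0 (m : Int) 1)).foldl
              (pvMergeStep (pvFences cs (PySem.List.pyRange 0 (M : Int) 1))) (false, 0, 0)).2.1
          ((pvNewlines cs (PySem.List.pyRange 0 (m : Int) 1)).foldl
              (pvMergeStep (pvFences cs (PySem.List.pyRange 0 (M : Int) 1))) (false, 0, 0)).1
          rfl hkc
        have hcnt := pvCountP_le_eq cs m M hmM hf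
        -- the new parity equals the in_code bit of the prefix fold
        have hpar : (pvAdvance (pvFences cs (PySem.List.pyRange 0 (M : Int) 1)) (m : Int)
              ((pvNewlines cs (PySem.List.pyRange 0 (m : Int) 1)).foldl
                (pvMergeStep (pvFences cs (PySem.List.pyRange 0 (M : Int) 1))) (false, 0, 0)).1
              ((pvNewlines cs (PySem.List.pyRange 0 (m : Int) 1)).foldl
                (pvMergeStep (pvFences cs (PySem.List.pyRange 0 (M : Int) 1))) (false, 0, 0)).2.1)
            = (((pvFences cs (PySem.List.pyRange 0 (m : Int) 1)).length % 2 == 1),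
               (pvFences cs (PySem.List.pyRange 0 (M : Int) 1)).countP
                 (fun f => decide (f ≤ (m : Int)))) := by
          rw [hadv, ih3, ih4, ← ih4]
          rw [pvParity _ _ hkc, hcnt]
        refine ⟨?_, ?_, ?_, (m : Int), by omega, ?_⟩
        · show (pvStepB cs _ (m : Int)).1 = _
          rw [pvStepB, if_neg hf]
          split
          · exact ih1
          · exact ih1
        · show (pvStepB cs _ (m : Int)).2 = (pvMergeStep _ _ (m : Int)).2.2
          rw [pvStepB, if_neg hf, pvMergeStep]
          simp only [hpar]
          rcases hsb : ((PySem.List.pyRange 0 (m : Int) 1).foldl (pvStepB cs) (false, 0)).1 with _ | _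
          · have : (((pvFences cs (PySem.List.pyRange 0 (m : Int) 1)).length % 2 == 1)) = false := by
              rw [← ih1, hsb]
            simp [hget, this]
          · have : (((pvFences cs (PySem.List.pyRange 0 (m : Int) 1)).length % 2 == 1)) = true := by
              rw [← ih1, hsb]
            simp [hget, this]
            exact ih2
        · show (pvMergeStep _ _ (m : Int)).1 = ((pvMergeStep _ _ (m : Int)).2.1 % 2 == 1)
          rw [pvMergeStep]
          simp only [hpar, hcnt]
        · show (pvMergeStep _ _ (m : Int)).2.1 = _
          rw [pvMergeStep]
          simp only [hpar]
      · -- neither a fence toggle nor a newline at m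
        have hget : ¬ (PySem.List.pyGetD cs (m : Int) ' ' = '\n') := by
          rw [← pvNl_iff cs (m : Int) (by omega)]
          exact hnl
        have e2 : pvNewlines cs (PySem.List.pyRange 0 (m : Int) 1 ++ [(m : Int)])
            = pvNewlines cs (PySem.List.pyRange 0 (m : Int) 1) := by
          simp [pvNewlines, List.filter_append, hnl]
        rw [e1, e2]
        simp only [List.foldl_append, List.foldl_cons, List.foldl_nil]
        have estep : pvStepB cs ((PySem.List.pyRange 0 (m : Int) 1).foldl (pvStepB cs) (false, 0))
            (m : Int) = (PySem.List.pyRange 0 (m : Int) 1).foldl (pvStepB cs) (false, 0) := by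
          rw [pvStepB, if_neg hf]
          have hbeq : (PySem.List.pyGetD cs (m : Int) ' ' == '\n') = false := by
            simpa using hget
          rw [hbeq]
          simp
        rw [estep]
        exact ⟨ih1, ih2, ih3, t, by omega, ih4⟩

-- the two programs compute the same safe point whenever the text is longer than max_chars
lemma pvFold_snd_eq (cs : List Char) (max_chars : Int) (hlen : max_chars < (cs.length : Int)) :
    ((PySem.List.pyRange 0 (cs.length : Int) 1).foldl (pvStepA cs max_chars) (false, 0)).2
      = pvLastSafeMerge (pvFences cs (PySem.List.pyRange 0 (max_chars + 1) 1))
          (pvNewlines cs (PySem.List.pyRange 0 (max_chars + 1) 1)) := by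
  by_cases hmc : 0 ≤ max_chars
  · have hM : ((((max_chars + 1).toNat : Nat) : Int)) = max_chars + 1 := by omega
    rw [PySem.List.pyRange_one_append 0 (max_chars + 1) (cs.length : Int) (by omega) (by omega),
      List.foldl_append,
      pvStepA_tail_snd cs max_chars _
        (fun i hi => by
          have := (PySem.List.mem_pyRange_one).1 hi
          omega),
      PySem.List.foldl_congr_mem _ (pvStepA cs max_chars) (pvStepB cs) (false, 0)
        (fun acc x hx => by
          have := (PySem.List.mem_pyRange_one).1 hx
          exact pvStep_agree cs max_chars x this.1 (by omega) acc)]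
    have := (pvMain cs (max_chars + 1).toNat (max_chars + 1).toNat (le_refl _)).2.1
    rw [hM] at this
    rw [this]
    rfl
  · have hnil : PySem.List.pyRange 0 (max_chars + 1) 1 = [] :=
      PySem.List.pyRange_one_eq_nil (by omega)
    rw [hnil,
      pvStepA_tail_snd cs max_chars _
        (fun i hi => by
          have := (PySem.List.mem_pyRange_one).1 hi
          omega)]
    rfl

-- ===== VERDICT (by name: the statement is the Claim_ definition above) =====
theorem truncate_preserving_code_py_spec : Claim_equal_truncate_preserving_code_py := by
  intro text max_chars _
  unfold Spec_truncate_preserving_code_py truncate_preserving_code_py truncate_preserving_code_py_alt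
  by_cases hlen : ((text.toList.length : Int) ≤ max_chars)
  · rw [if_pos hlen, if_pos hlen]
  · rw [if_neg hlen, if_neg hlen, pvFold_snd_eq text.toList max_chars (by omega)]
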